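-- pv_equiv track=rewrite | github.com/teqnodux/react_dashboard | backend/approval_master.py | find_status_index
-- ===== SOURCE A (Python) =====
-- from typing import Optional
--
-- def find_status_index(status: str, states: list[str]) -> Optional[int]:
--     """
--     Find the index of a status in the ordered states list.
--     Handles fuzzy matching (case-insensitive, partial match).
--     """
--     if not states:
--         return None
--     s_lower = status.lower().strip()
--     # Exact match first
--     for i, state in enumerate(states):
--         if state.lower().strip() == s_lower:
--             return i
--     # Partial/fuzzy match
--     for i, state in enumerate(states):
--         state_lower = state.lower().strip()
--         if s_lower in state_lower or state_lower in s_lower: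
--             return i
--     return None
-- ===== SOURCE B (Python) =====
-- from typing import Optional
--
-- def find_status_index(status: str, states: list[str]) -> Optional[int]:
--     """Single pass: return the first exact match immediately; remember the
--     first fuzzy match and return it only after the whole list was scanned."""
--     s_lower = status.lower().strip()
--     fuzzy: Optional[int] = None
--     for i, state in enumerate(states):
--         state_lower = state.lower().strip()
--         if state_lower == s_lower:
--             return i
--         if fuzzy is None and (s_lower in state_lower or state_lower in s_lower):
--             fuzzy = i
--     return fuzzy
-- ===== Notes on version B (the rewrite author's own statement) =====
-- stated objective: alternative
-- what changed: A's two sequential scans (exact pass, then fuzzy pass, each re-normalising every state) are collapsed into a single pass that returns an exact match immediately and remembers the first fuzzy candidate, normalising each state once.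
import Mathlib
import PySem

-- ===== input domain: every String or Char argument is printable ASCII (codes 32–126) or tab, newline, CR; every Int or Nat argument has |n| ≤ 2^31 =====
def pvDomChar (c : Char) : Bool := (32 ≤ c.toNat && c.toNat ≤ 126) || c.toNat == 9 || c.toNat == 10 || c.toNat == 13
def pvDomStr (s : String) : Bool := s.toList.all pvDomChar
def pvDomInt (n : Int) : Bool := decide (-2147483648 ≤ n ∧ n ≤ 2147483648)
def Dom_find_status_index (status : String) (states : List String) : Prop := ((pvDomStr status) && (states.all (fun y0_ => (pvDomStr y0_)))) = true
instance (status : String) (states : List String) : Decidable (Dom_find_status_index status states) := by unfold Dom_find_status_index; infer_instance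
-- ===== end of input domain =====

-- B replaces A's two sequential scans with one pass that returns an exact match immediately and remembers the first fuzzy candidate (same return value; one-pass alternative decomposition).
-- ===== PORT A =====
def pvNorm (s : String) : String := PySem.Str.strip (PySem.Str.lower s)

def pvFindExact (sl : String) : List String → Int → Option Int
  | [], _ => none
  | st :: rest, i =>
      if pvNorm st == sl then some i else pvFindExact sl rest (i + 1)

def pvFindFuzzy (sl : String) : List String → Int → Option Int
  | [], _ => none
  | st :: rest, i =>
      let stl := pvNorm st
      if PySem.Str.isIn sl stl || PySem.Str.isIn stl sl then some i
      else pvFindFuzzy sl rest (i + 1)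

def find_status_index (status : String) (states : List String) : Option Int :=
  if states.isEmpty then none
  else
    let sl := pvNorm status
    match pvFindExact sl states 0 with
    | some i => some i
    | none => pvFindFuzzy sl states 0

-- ===== PORT B =====
def pvScan (sl : String) : List String → Int → Option Int → Option Int
  | [], _, fuzzy => fuzzy
  | st :: rest, i, fuzzy =>
      let stl := pvNorm st
      if stl == sl then some i
      else
        pvScan sl rest (i + 1)
          (if fuzzy.isNone && (PySem.Str.isIn sl stl || PySem.Str.isIn stl sl) then some i else fuzzy)

def find_status_index_alt (status : String) (states : List String) : Option Int :=
  pvScan (pvNorm status) states 0 none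

-- ===== PRECONDITION & SPEC =====
def Spec_find_status_index (status : String) (states : List String) (out : Option Int) : Prop := out = find_status_index_alt status states
instance (status : String) (states : List String) (out : Option Int) : Decidable (Spec_find_status_index status states out) := by unfold Spec_find_status_index; infer_instance

-- ===== CLAIM (what is proved, stated in full; the proofs are below) =====
def Claim_equal_find_status_index : Prop := ∀ (status : String) (states : List String), Dom_find_status_index status states → Spec_find_status_index status states (find_status_index status states)

-- ===== LEMMAS AND PROOFS =====

lemma pvScan_eq (sl : String) (xs : List String) (i : Int) (fz : Option Int) :
    pvScan sl xs i fz =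
      match pvFindExact sl xs i with
      | some j => some j
      | none =>
        match fz with
        | some f => some f
        | none => pvFindFuzzy sl xs i := by
  induction xs generalizing i fz with
  | nil => cases fz <;> simp [pvScan, pvFindExact, pvFindFuzzy]
  | cons st rest ih =>
    simp only [pvScan, pvFindExact, pvFindFuzzy]
    by_cases h : (pvNorm st == sl) = true
    · simp [h]
    · simp only [h, if_false, Bool.false_eq_true, ih]
      cases fz with
      | some f => simp
      | none =>
        by_cases hf : (PySem.Str.isIn sl (pvNorm st) || PySem.Str.isIn (pvNorm st) sl) = true
        · simp only [Option.isNone_none, Bool.true_and, if_pos hf]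
        · simp only [Option.isNone_none, Bool.true_and, if_neg hf]

-- ===== VERDICT (by name: the statement is the Claim_ definition above) =====
theorem find_status_index_spec : Claim_equal_find_status_index := by
  intro status states _
  unfold Spec_find_status_index find_status_index find_status_index_alt
  cases states with
  | nil => simp [pvScan]
  | cons st rest => simp only [List.isEmpty_cons, if_false, Bool.false_eq_true, pvScan_eq]
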